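-- pv_equiv track=rewrite | github.com/hannah2602/DAA | cloudyday.py | maximumPeople
-- ===== SOURCE A (Python) =====
-- def maximumPeople(p, x, m, c, r):
--     n = len(p)
--     events = []
--
--     for i in range(m):
--         events.append((c[i] - r[i], 'start', i))
--         events.append((c[i] + r[i] + 1, 'end', i))
--
--     for i in range(n):
--         events.append((x[i], 'town', i))
--
--     events.sort()
--
--     active_clouds = set()
--     cloud_population = [0] * m
--     town_sunny_population = [0] * n
--     total_sunny = 0
--
--     for event in events:
--         position, event_type, index = event
--         if event_type == 'start':
--             active_clouds.add(index)
--         elif event_type == 'end':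
--             active_clouds.remove(index)
--         elif event_type == 'town':
--             if len(active_clouds) == 0:
--                 total_sunny += p[index]
--             elif len(active_clouds) == 1:
--                 cloud_population[list(active_clouds)[0]] += p[index]
--
--     max_sunny_with_one_removed = total_sunny + max(cloud_population, default=0)
--     return max_sunny_with_one_removed
-- ===== SOURCE B (Python) =====
-- def maximumPeople(p, x, m, c, r):
--     # Direct per-town scan instead of A's sorted sweep-line: count covering
--     # clouds per town; 0 -> always sunny, exactly 1 -> credit that cloud.
--     base = 0
--     buckets = [0] * m
--     for j in range(len(p)):
--         cnt = 0
--         last = -1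
--         for i in range(m):
--             if c[i] - r[i] <= x[j] <= c[i] + r[i]:
--                 cnt += 1
--                 last = i
--         if cnt == 0:
--             base += p[j]
--         elif cnt == 1:
--             buckets[last] += p[j]
--     return base + max(buckets, default=0)
-- ===== Notes on version B (the rewrite author's own statement) =====
-- stated objective: simpler
-- what changed: Replaced the event-list sweep-line (build start/end/town events, sort them, sweep with an active-cloud set) by a direct per-town scan that counts covering clouds and buckets singly-covered population per cloud.
import Mathlib
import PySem

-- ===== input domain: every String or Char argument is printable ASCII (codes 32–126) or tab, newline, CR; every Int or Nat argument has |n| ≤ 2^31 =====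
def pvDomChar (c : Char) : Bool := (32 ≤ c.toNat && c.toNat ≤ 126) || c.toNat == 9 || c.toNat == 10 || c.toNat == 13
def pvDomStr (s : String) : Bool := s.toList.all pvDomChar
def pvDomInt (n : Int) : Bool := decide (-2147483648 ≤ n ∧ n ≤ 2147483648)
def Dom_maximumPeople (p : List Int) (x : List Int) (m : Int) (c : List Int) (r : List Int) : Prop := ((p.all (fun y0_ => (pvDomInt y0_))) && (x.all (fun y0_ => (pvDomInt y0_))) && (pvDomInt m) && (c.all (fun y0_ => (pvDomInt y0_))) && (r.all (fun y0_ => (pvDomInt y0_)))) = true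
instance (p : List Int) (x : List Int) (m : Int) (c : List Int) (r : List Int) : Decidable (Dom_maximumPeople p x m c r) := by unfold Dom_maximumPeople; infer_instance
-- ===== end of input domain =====

-- One line: B replaces A's sort-based sweep-line over start/end/town events by a direct
-- per-town scan of the clouds (simpler; not claimed faster).

-- ===== PORT A =====

-- Python's '<' on the (int, str, int) event tuples: lexicographic (exact hand port; no PySem 3-tuple sort).
def pvEvLt (a b : Int × String × Int) : Bool :=
  decide (a.1 < b.1) || (a.1 == b.1 && (decide (a.2.1 < b.2.1) || (a.2.1 == b.2.1 && decide (a.2.2 < b.2.2))))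

-- the body of A's sweep loop
def pvStepA (p : List Int) (st : List Int × List Int × Int) (e : Int × String × Int) : List Int × List Int × Int :=
  if e.2.1 = "start" then (PySem.Set.add st.1 e.2.2, st.2.1, st.2.2)
  else if e.2.1 = "end" then
    -- set.remove: KeyError (= none) is excluded by Pre_ (radii nonnegative)
    ((PySem.Set.remove? st.1 e.2.2).getD st.1, st.2.1, st.2.2)
  else if e.2.1 = "town" then
    (if PySem.Set.len st.1 = 0 then (st.1, st.2.1, st.2.2 + PySem.List.pyGetD p e.2.2 0)
     else if PySem.Set.len st.1 = 1 then
       -- list(active_clouds)[0]: the set is a singleton here, so hash order is irrelevant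
       (st.1, PySem.List.pySetD st.2.1 (PySem.List.pyGetD st.1 0 0)
                (PySem.List.pyGetD st.2.1 (PySem.List.pyGetD st.1 0 0) 0 + PySem.List.pyGetD p e.2.2 0), st.2.2)
     else st)
  else st

def maximumPeople (p : List Int) (x : List Int) (m : Int) (c : List Int) (r : List Int) : Int :=
  let n : Int := PySem.List.len p
  let events1 : List (Int × String × Int) := (PySem.List.pyRange 0 m 1).foldl (fun ev i =>
      ev ++ [(PySem.List.pyGetD c i 0 - PySem.List.pyGetD r i 0, "start", i)]
         ++ [(PySem.List.pyGetD c i 0 + PySem.List.pyGetD r i 0 + 1, "end", i)]) []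
  let events2 : List (Int × String × Int) := (PySem.List.pyRange 0 n 1).foldl (fun ev i =>
      ev ++ [(PySem.List.pyGetD x i 0, "town", i)]) events1
  -- events.sort(): stable insertion with Python's tuple '<' (pvEvLt); exact because the
  -- event tuples are pairwise distinct, so the sorted permutation is unique.
  let events : List (Int × String × Int) := events2.foldl (fun acc e => PySem.List.insertBy pvEvLt e acc) []
  let st := events.foldl (pvStepA p)
    (((PySem.Set.empty : PySem.Set Int) : List Int), List.replicate m.toNat 0, (0 : Int))
  st.2.2 + PySem.List.maxD st.2.1 (fun v => v) 0

-- ===== PORT B =====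

-- the body of B's inner cloud scan: count covering clouds, remember the last one
def pvInnerB (x : List Int) (c : List Int) (r : List Int) (j : Int) (s : Int × Int) (i : Int) : Int × Int :=
  if decide (PySem.List.pyGetD c i 0 - PySem.List.pyGetD r i 0 ≤ PySem.List.pyGetD x j 0)
     && decide (PySem.List.pyGetD x j 0 ≤ PySem.List.pyGetD c i 0 + PySem.List.pyGetD r i 0)
  then (s.1 + 1, i) else s

-- the body of B's per-town loop
def pvStepB (p : List Int) (x : List Int) (m : Int) (c : List Int) (r : List Int) (st : Int × List Int) (j : Int) : Int × List Int :=
  let inner := (PySem.List.pyRange 0 m 1).foldl (pvInnerB x c r j) ((0 : Int), (-1 : Int))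
  if inner.1 = 0 then (st.1 + PySem.List.pyGetD p j 0, st.2)
  else if inner.1 = 1 then
    (st.1, PySem.List.pySetD st.2 inner.2 (PySem.List.pyGetD st.2 inner.2 0 + PySem.List.pyGetD p j 0))
  else st

def maximumPeople_alt (p : List Int) (x : List Int) (m : Int) (c : List Int) (r : List Int) : Int :=
  let n : Int := PySem.List.len p
  let st := (PySem.List.pyRange 0 n 1).foldl (pvStepB p x m c r) ((0 : Int), List.replicate m.toNat 0)
  st.1 + PySem.List.maxD st.2 (fun v => v) 0

-- ===== PRECONDITION & SPEC =====
-- A raises IndexError when m > len(c), m > len(r) or len(p) > len(x), and KeyError when some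
-- cloud i < m has a negative radius (its end event sorts before its start); Pre_ excludes exactly those.
def Pre_maximumPeople (p : List Int) (x : List Int) (m : Int) (c : List Int) (r : List Int) : Prop :=
  m ≤ (c.length : Int) ∧ m ≤ (r.length : Int) ∧ (p.length : Int) ≤ (x.length : Int) ∧
  ∀ i ∈ PySem.List.pyRange 0 m 1, 0 ≤ PySem.List.pyGetD r i 0
instance (p : List Int) (x : List Int) (m : Int) (c : List Int) (r : List Int) : Decidable (Pre_maximumPeople p x m c r) := by unfold Pre_maximumPeople; infer_instance

def pvWitness_maximumPeople : List Int × List Int × Int × List Int × List Int :=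
  ([3, 5, 8], [1, 4, 6], 2, [2, 7], [1, 0])

def Spec_maximumPeople (p : List Int) (x : List Int) (m : Int) (c : List Int) (r : List Int) (out : Int) : Prop := out = maximumPeople_alt p x m c r
instance (p : List Int) (x : List Int) (m : Int) (c : List Int) (r : List Int) (out : Int) : Decidable (Spec_maximumPeople p x m c r out) := by unfold Spec_maximumPeople; infer_instance

-- ===== CLAIM (what is proved, stated in full; the proofs are below) =====
def Claim_equal_maximumPeople : Prop := ∀ (p : List Int) (x : List Int) (m : Int) (c : List Int) (r : List Int), Dom_maximumPeople p x m c r → Pre_maximumPeople p x m c r → Spec_maximumPeople p x m c r (maximumPeople p x m c r)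
-- ===== LEMMAS AND PROOFS =====

-- ---- shared spec-side definitions (proof helpers only) ----

-- the three event shapes A builds
def pvStart (c r : List Int) (i : Int) : Int × String × Int :=
  (PySem.List.pyGetD c i 0 - PySem.List.pyGetD r i 0, "start", i)
def pvEnd (c r : List Int) (i : Int) : Int × String × Int :=
  (PySem.List.pyGetD c i 0 + PySem.List.pyGetD r i 0 + 1, "end", i)
def pvTown (x : List Int) (j : Int) : Int × String × Int :=
  (PySem.List.pyGetD x j 0, "town", j)

def pvEvents (x c r : List Int) (m n : Int) : List (Int × String × Int) :=
  ((PySem.List.pyRange 0 m 1).flatMap (fun i => [pvStart c r i, pvEnd c r i]))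
    ++ (PySem.List.pyRange 0 n 1).map (pvTown x)

-- rank of the event-type string in Python's string order: "end" < "start" < "town"
def pvRank (s : String) : Int := if s = "end" then 0 else if s = "start" then 1 else 2

-- an integer key realising Python's lexicographic tuple order on the events
def pvKey (m n : Int) (e : Int × String × Int) : Int :=
  (e.1 * 3 + pvRank e.2.1) * (max m n) + e.2.2

-- does cloud i cover town j?
def pvQ (x c r : List Int) (j : Int) (i : Int) : Bool :=
  decide (PySem.List.pyGetD c i 0 - PySem.List.pyGetD r i 0 ≤ PySem.List.pyGetD x j 0)
  && decide (PySem.List.pyGetD x j 0 ≤ PySem.List.pyGetD c i 0 + PySem.List.pyGetD r i 0)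

-- the (increasing) list of clouds covering town j
def pvCov (x c r : List Int) (m : Int) (j : Int) : List Int :=
  (PySem.List.pyRange 0 m 1).filter (pvQ x c r j)

-- summand: population of town j if its coverage list is exactly t
def pvPick (p x c r : List Int) (m : Int) (t : List Int) (j : Int) : Int :=
  if pvCov x c r m j = t then PySem.List.pyGetD p j 0 else 0
def pvSum (p x c r : List Int) (m n : Int) (t : List Int) : Int :=
  ((PySem.List.pyRange 0 n 1).map (pvPick p x c r m t)).sum
-- the same sum restricted to towns whose event is already processed (in `done`)
def pvPickD (p x c r : List Int) (m : Int) (done : List (Int × String × Int)) (t : List Int) (j : Int) : Int :=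
  if pvTown x j ∈ done ∧ pvCov x c r m j = t then PySem.List.pyGetD p j 0 else 0
def pvSumD (p x c r : List Int) (m n : Int) (done : List (Int × String × Int)) (t : List Int) : Int :=
  ((PySem.List.pyRange 0 n 1).map (pvPickD p x c r m done t)).sum

def pvBuckets (p x c r : List Int) (m n : Int) : List Int :=
  (List.range m.toNat).map (fun (k : Nat) => pvSum p x c r m n [(k : Int)])

-- ---- arithmetic: the key is lexicographic ----

lemma pvLexbase (a b i1 i2 K : Int) (h1 : 0 ≤ i1) (h2 : i1 < K) (h3 : 0 ≤ i2) (h4 : i2 < K) :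
    a * K + i1 < b * K + i2 ↔ (a < b ∨ (a = b ∧ i1 < i2)) := by
  constructor
  · intro h
    rcases lt_trichotomy a b with hab | hab | hab
    · exact Or.inl hab
    · exact Or.inr ⟨hab, by subst hab; omega⟩
    · exfalso
      have : (b + 1) * K ≤ a * K := mul_le_mul_of_nonneg_right (by omega) (by omega)
      nlinarith
  · rintro (hab | ⟨hab, hi⟩)
    · have : (a + 1) * K ≤ b * K := mul_le_mul_of_nonneg_right (by omega) (by omega)
      nlinarith
    · subst hab; omega

lemma pvRank_bounds (s : String) : 0 ≤ pvRank s ∧ pvRank s < 3 := by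
  unfold pvRank; split_ifs <;> omega

lemma pvKey_lt_iff (m n : Int) (e1 e2 : Int × String × Int)
    (h1 : 0 ≤ e1.2.2) (h1' : e1.2.2 < max m n) (h2 : 0 ≤ e2.2.2) (h2' : e2.2.2 < max m n) :
    pvKey m n e1 < pvKey m n e2 ↔
      (e1.1 < e2.1 ∨ (e1.1 = e2.1 ∧ (pvRank e1.2.1 < pvRank e2.2.1 ∨
        (pvRank e1.2.1 = pvRank e2.2.1 ∧ e1.2.2 < e2.2.2)))) := by
  unfold pvKey
  rw [pvLexbase _ _ _ _ _ h1 h1' h2 h2']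
  have r1 := pvRank_bounds e1.2.1
  have r2 := pvRank_bounds e2.2.1
  omega

lemma pvKey_eq_iff (m n : Int) (e1 e2 : Int × String × Int)
    (h1 : 0 ≤ e1.2.2) (h1' : e1.2.2 < max m n) (h2 : 0 ≤ e2.2.2) (h2' : e2.2.2 < max m n) :
    pvKey m n e1 = pvKey m n e2 ↔
      (e1.1 = e2.1 ∧ pvRank e1.2.1 = pvRank e2.2.1 ∧ e1.2.2 = e2.2.2) := by
  have hlt := pvKey_lt_iff m n e1 e2 h1 h1' h2 h2'
  have hgt := pvKey_lt_iff m n e2 e1 h2 h2' h1 h1'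
  constructor
  · intro heq
    have hn1 : ¬ pvKey m n e1 < pvKey m n e2 := by rw [heq]; exact lt_irrefl _
    have hn2 : ¬ pvKey m n e2 < pvKey m n e1 := by rw [heq]; exact lt_irrefl _
    rw [hlt] at hn1; rw [hgt] at hn2
    omega
  · rintro ⟨hp, hr, hi⟩
    unfold pvKey; rw [hp, hr, hi]

-- ---- event membership / shapes ----

lemma pvMem_events (x c r : List Int) (m n : Int) (e : Int × String × Int) :
    e ∈ pvEvents x c r m n ↔
      ((∃ i, (0 ≤ i ∧ i < m) ∧ (e = pvStart c r i ∨ e = pvEnd c r i)) ∨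
       (∃ j, (0 ≤ j ∧ j < n) ∧ e = pvTown x j)) := by
  simp [pvEvents, List.mem_flatMap, PySem.List.mem_pyRange_one]
  constructor
  · rintro (⟨i, hi, he⟩ | ⟨j, hj, he⟩)
    · exact Or.inl ⟨i, hi, by tauto⟩
    · exact Or.inr ⟨j, hj, he.symm⟩
  · rintro (⟨i, hi, he⟩ | ⟨j, hj, he⟩)
    · exact Or.inl ⟨i, hi, by tauto⟩
    · exact Or.inr ⟨j, hj, he.symm⟩

lemma pvIdx_bounds (x c r : List Int) (m n : Int) (e : Int × String × Int)
    (he : e ∈ pvEvents x c r m n) : 0 ≤ e.2.2 ∧ e.2.2 < max m n := by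
  rw [pvMem_events] at he
  rcases he with ⟨i, hi, he | he⟩ | ⟨j, hj, he⟩ <;>
    subst he <;> simp [pvStart, pvEnd, pvTown] <;> omega

-- the Bool comparator as a Prop
-- order of the three event-type strings ("end" < "start" < "town"), on the list-of-chars side
lemma pvLt_es : (['e','n','d'] : List Char) < ['s','t','a','r','t'] := by decide
lemma pvLt_et : (['e','n','d'] : List Char) < ['t','o','w','n'] := by decide
lemma pvLt_st : (['s','t','a','r','t'] : List Char) < ['t','o','w','n'] := by decide
lemma pvNlt_se : ¬ (['s','t','a','r','t'] : List Char) < ['e','n','d'] := by decide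
lemma pvNlt_te : ¬ (['t','o','w','n'] : List Char) < ['e','n','d'] := by decide
lemma pvNlt_ts : ¬ (['t','o','w','n'] : List Char) < ['s','t','a','r','t'] := by decide

lemma pvEvLt_eq_decide (a b : Int × String × Int) :
    pvEvLt a b = decide (a.1 < b.1 ∨ (a.1 = b.1 ∧ (a.2.1 < b.2.1 ∨ (a.2.1 = b.2.1 ∧ a.2.2 < b.2.2)))) := by
  rw [Bool.eq_iff_iff]
  simp only [pvEvLt, Bool.or_eq_true, Bool.and_eq_true, beq_iff_eq, decide_eq_true_eq]

-- on events, the comparator agrees with the integer key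
lemma pvEvLt_eq_key (x c r : List Int) (m n : Int) (a b : Int × String × Int)
    (ha : a ∈ pvEvents x c r m n) (hb : b ∈ pvEvents x c r m n) :
    pvEvLt a b = decide (pvKey m n a < pvKey m n b) := by
  rw [pvEvLt_eq_decide]
  apply decide_eq_decide.mpr
  have hb1 := pvIdx_bounds x c r m n a ha
  have hb2 := pvIdx_bounds x c r m n b hb
  rw [pvKey_lt_iff m n a b hb1.1 hb1.2 hb2.1 hb2.2]
  rcases (pvMem_events x c r m n a).1 ha with ⟨i, hi, rfl | rfl⟩ | ⟨j, hj, rfl⟩ <;>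
    rcases (pvMem_events x c r m n b).1 hb with ⟨i', hi', rfl | rfl⟩ | ⟨j', hj', rfl⟩ <;>
    simp [pvStart, pvEnd, pvTown, pvRank, pvLt_es, pvLt_et, pvLt_st,
      pvNlt_se, pvNlt_te, pvNlt_ts]

-- the key is injective on events
lemma pvKey_inj (x c r : List Int) (m n : Int) (a b : Int × String × Int)
    (ha : a ∈ pvEvents x c r m n) (hb : b ∈ pvEvents x c r m n)
    (h : pvKey m n a = pvKey m n b) : a = b := by
  have hb1 := pvIdx_bounds x c r m n a ha
  have hb2 := pvIdx_bounds x c r m n b hb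
  rw [pvKey_eq_iff m n a b hb1.1 hb1.2 hb2.1 hb2.2] at h
  rcases (pvMem_events x c r m n a).1 ha with ⟨i, hi, rfl | rfl⟩ | ⟨j, hj, rfl⟩ <;>
    rcases (pvMem_events x c r m n b).1 hb with ⟨i', hi', rfl | rfl⟩ | ⟨j', hj', rfl⟩ <;>
    simp [pvStart, pvEnd, pvTown, pvRank] at h ⊢ <;>
    omega

lemma pvEvents_nodup (x c r : List Int) (m n : Int) : (pvEvents x c r m n).Nodup := by
  unfold pvEvents
  rw [List.nodup_append]
  refine ⟨?_, ?_, ?_⟩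
  · have : ∀ l : List Int, l.Nodup → (l.flatMap (fun i => [pvStart c r i, pvEnd c r i])).Nodup := by
      intro l
      induction l with
      | nil => intro _; simp
      | cons a t ih =>
          intro hnd
          rw [List.nodup_cons] at hnd
          simp only [List.flatMap_cons]
          rw [List.nodup_append]
          refine ⟨by simp [pvStart, pvEnd], ih hnd.2, ?_⟩
          intro e he1 e' he2 heq
          subst heq
          obtain ⟨i, hit, hei⟩ := List.mem_flatMap.1 he2
          have h1 : e.2.2 = a := by
            rcases List.mem_cons.1 he1 with h | h
            · rw [h]; rfl
            · rw [List.mem_singleton.1 h]; rfl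
          have h2 : e.2.2 = i := by
            rcases List.mem_cons.1 hei with h | h
            · rw [h]; rfl
            · rw [List.mem_singleton.1 h]; rfl
          exact hnd.1 (by rw [← h1, h2]; exact hit)
    exact this _ (PySem.List.nodup_pyRange_one 0 m)
  · exact (PySem.List.nodup_pyRange_one 0 n).map (fun j j' h => congrArg (fun e => e.2.2) h)
  · intro e he1 e' he2 heq
    subst heq
    obtain ⟨i, _, hei⟩ := List.mem_flatMap.1 he1
    obtain ⟨j, _, hej⟩ := List.mem_map.1 he2
    have h1 : e.2.1 = "start" ∨ e.2.1 = "end" := by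
      rcases List.mem_cons.1 hei with h | h
      · rw [h]; exact Or.inl rfl
      · rw [List.mem_singleton.1 h]; exact Or.inr rfl
    have h2 : e.2.1 = "town" := by rw [← hej]; rfl
    rcases h1 with h | h <;> rw [h2] at h <;> simp at h

-- ---- the sort in port A is sorted-by-key ----

lemma pvInsertBy_congr (bef1 bef2 : (Int × String × Int) → (Int × String × Int) → Bool)
    (P : (Int × String × Int) → Prop)
    (hcong : ∀ a b, P a → P b → bef1 a b = bef2 a b) :
    ∀ (acc : List (Int × String × Int)) (y : Int × String × Int), P y → (∀ z ∈ acc, P z) →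
      PySem.List.insertBy bef1 y acc = PySem.List.insertBy bef2 y acc := by
  intro acc
  induction acc with
  | nil => intro y _ _; rfl
  | cons a t ih =>
      intro y hy hacc
      simp only [PySem.List.insertBy]
      rw [hcong y a hy (hacc a (by simp))]
      split
      · rfl
      · rw [ih y hy (fun z hz => hacc z (by simp [hz]))]

lemma pvFoldl_insertBy_congr (bef1 bef2 : (Int × String × Int) → (Int × String × Int) → Bool)
    (P : (Int × String × Int) → Prop)
    (hcong : ∀ a b, P a → P b → bef1 a b = bef2 a b) :
    ∀ (l acc : List (Int × String × Int)), (∀ z ∈ l, P z) → (∀ z ∈ acc, P z) →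
      l.foldl (fun acc e => PySem.List.insertBy bef1 e acc) acc
        = l.foldl (fun acc e => PySem.List.insertBy bef2 e acc) acc := by
  intro l
  induction l with
  | nil => intro acc _ _; rfl
  | cons a t ih =>
      intro acc hl hacc
      simp only [List.foldl_cons]
      rw [pvInsertBy_congr bef1 bef2 P hcong acc a (hl a (by simp)) hacc]
      exact ih _ (fun z hz => hl z (by simp [hz]))
        (fun z hz => by
          rcases (PySem.List.mem_insertBy _ _ _ _).1 hz with h | h
          · exact h ▸ hl a (by simp)
          · exact hacc z h)

lemma pvSort_eq (x c r : List Int) (m n : Int) :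
    (pvEvents x c r m n).foldl (fun acc e => PySem.List.insertBy pvEvLt e acc) []
      = PySem.List.sorted (pvEvents x c r m n) (pvKey m n) false := by
  rw [PySem.List.sorted_eq_foldl_insertBy]
  exact pvFoldl_insertBy_congr _ _ (· ∈ pvEvents x c r m n)
    (fun a b ha hb => pvEvLt_eq_key x c r m n a b ha hb)
    _ [] (fun z hz => hz) (by simp)

lemma pvSorted_strict (x c r : List Int) (m n : Int) :
    (PySem.List.sorted (pvEvents x c r m n) (pvKey m n) false).Pairwise
      (fun a b => pvKey m n a < pvKey m n b) := by
  have hnd : (PySem.List.sorted (pvEvents x c r m n) (pvKey m n) false).Nodup :=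
    (PySem.List.sorted_perm (pvEvents x c r m n) (pvKey m n) false).nodup_iff.2
      (pvEvents_nodup x c r m n)
  have hle := PySem.List.sorted_pairwise (pvEvents x c r m n) (pvKey m n)
  refine (hle.and hnd).imp_of_mem ?_
  intro a b ha hb hab
  refine lt_of_le_of_ne hab.1 (fun heq => hab.2 ?_)
  exact pvKey_inj x c r m n a b
    ((PySem.List.mem_sorted _ _ _ a).1 ha) ((PySem.List.mem_sorted _ _ _ b).1 hb) heq

-- ---- prefix membership along the sweep ----

lemma pvPrefix_mem (x c r : List Int) (m n : Int)
    (S done rest : List (Int × String × Int)) (e : Int × String × Int)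
    (hS : done ++ e :: rest = S)
    (hperm : S.Perm (pvEvents x c r m n))
    (hpw : S.Pairwise (fun a b => pvKey m n a < pvKey m n b))
    (y : Int × String × Int) (hy : y ∈ pvEvents x c r m n) :
    (y ∈ done ↔ pvKey m n y < pvKey m n e) := by
  subst hS
  rw [List.pairwise_append] at hpw
  obtain ⟨hd, hc, hcross⟩ := hpw
  rw [List.pairwise_cons] at hc
  obtain ⟨he_rest, _⟩ := hc
  have hyS : y ∈ done ++ e :: rest := hperm.mem_iff.2 hy
  constructor
  · intro h; exact hcross y h e (by simp)
  · intro h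
    rcases List.mem_append.1 hyS with h1 | h1
    · exact h1
    · rcases List.mem_cons.1 h1 with h2 | h2
      · subst h2; exact absurd h (lt_irrefl _)
      · exact absurd (lt_trans h (he_rest y h2)) (lt_irrefl _)

-- ---- sum bookkeeping ----

lemma pvSum_map_update (l : List Int) (hl : l.Nodup) (j0 : Int) (hj0 : j0 ∈ l)
    (f g : Int → Int) (hagree : ∀ j ∈ l, j ≠ j0 → g j = f j) :
    (l.map g).sum = (l.map f).sum + (g j0 - f j0) := by
  induction l with
  | nil => cases hj0
  | cons a t ih =>
      rcases List.mem_cons.1 hj0 with h | h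
      · subst h
        have : ∀ j ∈ t, g j = f j := by
          intro j hj
          exact hagree j (by simp [hj]) (fun hne => (List.nodup_cons.1 hl).1 (hne ▸ hj))
        simp only [List.map_cons, List.sum_cons]
        rw [List.map_congr_left this]
        ring
      · have ha : g a = f a := hagree a (by simp) (fun hne => (List.nodup_cons.1 hl).1 (hne ▸ h))
        simp only [List.map_cons, List.sum_cons]
        rw [ih (List.nodup_cons.1 hl).2 h (fun j hj hne => hagree j (by simp [hj]) hne), ha]
        ring

lemma pvSumD_nil (p x c r : List Int) (m n : Int) (t : List Int) :
    pvSumD p x c r m n [] t = 0 := by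
  unfold pvSumD pvPickD
  rw [List.map_congr_left (g := fun _ => (0:Int)) (by intro j hj; simp)]
  simp

lemma pvSumD_append_not_town (p x c r : List Int) (m n : Int)
    (done : List (Int × String × Int)) (e : Int × String × Int)
    (he : e.2.1 ≠ "town") (t : List Int) :
    pvSumD p x c r m n (done ++ [e]) t = pvSumD p x c r m n done t := by
  unfold pvSumD
  apply congrArg
  apply List.map_congr_left
  intro j hj
  unfold pvPickD
  have : pvTown x j ∈ done ++ [e] ↔ pvTown x j ∈ done := by
    simp only [List.mem_append, List.mem_singleton]
    constructor
    · rintro (h | h)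
      · exact h
      · exact absurd (congrArg (fun q => q.2.1) h.symm) (by simpa [pvTown] using he)
    · exact Or.inl
  simp only [this]

lemma pvSumD_append_town (p x c r : List Int) (m n : Int)
    (done : List (Int × String × Int)) (j0 : Int) (hj0 : 0 ≤ j0 ∧ j0 < n)
    (hnotin : pvTown x j0 ∉ done) (t : List Int) :
    pvSumD p x c r m n (done ++ [pvTown x j0]) t
      = pvSumD p x c r m n done t + (if pvCov x c r m j0 = t then PySem.List.pyGetD p j0 0 else 0) := by
  unfold pvSumD
  rw [pvSum_map_update (PySem.List.pyRange 0 n 1) (PySem.List.nodup_pyRange_one 0 n) j0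
      (by rw [PySem.List.mem_pyRange_one]; omega)
      (pvPickD p x c r m done t) (pvPickD p x c r m (done ++ [pvTown x j0]) t) ?_]
  · have h1 : pvPickD p x c r m (done ++ [pvTown x j0]) t j0
        = (if pvCov x c r m j0 = t then PySem.List.pyGetD p j0 0 else 0) := by
      unfold pvPickD
      simp only [List.mem_append, List.mem_singleton]
      by_cases hcv : pvCov x c r m j0 = t <;> simp [hcv]
    have h2 : pvPickD p x c r m done t j0 = 0 := by
      unfold pvPickD
      simp [hnotin]
    rw [h1, h2]; ring
  · intro j hj hne
    unfold pvPickD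
    have : pvTown x j ∈ done ++ [pvTown x j0] ↔ pvTown x j ∈ done := by
      simp only [List.mem_append, List.mem_singleton]
      constructor
      · rintro (h | h)
        · exact h
        · exact absurd (congrArg (fun q => q.2.2) h) (by simpa [pvTown] using hne)
      · exact Or.inl
    simp only [this]

-- at the end of the sweep every town event is in S
lemma pvSumD_full (p x c r : List Int) (m n : Int) (S : List (Int × String × Int))
    (hperm : S.Perm (pvEvents x c r m n)) (t : List Int) :
    pvSumD p x c r m n S t = pvSum p x c r m n t := by
  unfold pvSumD pvSum
  apply congrArg
  apply List.map_congr_left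
  intro j hj
  rw [PySem.List.mem_pyRange_one] at hj
  have : pvTown x j ∈ S := by
    rw [hperm.mem_iff, pvMem_events]
    exact Or.inr ⟨j, by omega, rfl⟩
  unfold pvPickD pvPick
  simp [this]


-- membership of the three shapes in the event list
lemma pvStartE (x c r : List Int) (m n i : Int) (h1 : 0 ≤ i) (h2 : i < m) :
    pvStart c r i ∈ pvEvents x c r m n :=
  (pvMem_events x c r m n _).2 (Or.inl ⟨i, ⟨h1, h2⟩, Or.inl rfl⟩)
lemma pvEndE (x c r : List Int) (m n i : Int) (h1 : 0 ≤ i) (h2 : i < m) :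
    pvEnd c r i ∈ pvEvents x c r m n :=
  (pvMem_events x c r m n _).2 (Or.inl ⟨i, ⟨h1, h2⟩, Or.inr rfl⟩)

-- the three key comparisons the sweep needs
lemma pvKey_SE (x c r : List Int) (m n i : Int) (h1 : 0 ≤ i) (h2 : i < m)
    (hr : 0 ≤ PySem.List.pyGetD r i 0) :
    pvKey m n (pvStart c r i) < pvKey m n (pvEnd c r i) := by
  rw [pvKey_lt_iff m n _ _ (by simpa [pvStart] using h1)
    (by simp [pvStart]; omega) (by simpa [pvEnd] using h1) (by simp [pvEnd]; omega)]
  simp [pvStart, pvEnd, pvRank]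
  omega

lemma pvKey_ST (x c r : List Int) (m n i j : Int) (h1 : 0 ≤ i) (h2 : i < m)
    (h3 : 0 ≤ j) (h4 : j < n) :
    (pvKey m n (pvStart c r i) < pvKey m n (pvTown x j)
      ↔ PySem.List.pyGetD c i 0 - PySem.List.pyGetD r i 0 ≤ PySem.List.pyGetD x j 0) := by
  rw [pvKey_lt_iff m n _ _ (by simpa [pvStart] using h1)
    (by simp [pvStart]; omega) (by simpa [pvTown] using h3) (by simp [pvTown]; omega)]
  simp [pvStart, pvTown, pvRank]
  omega

lemma pvKey_ET (x c r : List Int) (m n i j : Int) (h1 : 0 ≤ i) (h2 : i < m)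
    (h3 : 0 ≤ j) (h4 : j < n) :
    (pvKey m n (pvEnd c r i) < pvKey m n (pvTown x j)
      ↔ PySem.List.pyGetD c i 0 + PySem.List.pyGetD r i 0 + 1 ≤ PySem.List.pyGetD x j 0) := by
  rw [pvKey_lt_iff m n _ _ (by simpa [pvEnd] using h1)
    (by simp [pvEnd]; omega) (by simpa [pvTown] using h3) (by simp [pvTown]; omega)]
  simp [pvEnd, pvTown, pvRank]
  omega

-- shape (in)equalities
lemma pvSS (c r : List Int) (i i' : Int) : pvStart c r i = pvStart c r i' ↔ i = i' :=
  ⟨fun h => congrArg (fun e => e.2.2) h, fun h => by rw [h]⟩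
lemma pvEE' (c r : List Int) (i i' : Int) : pvEnd c r i = pvEnd c r i' ↔ i = i' :=
  ⟨fun h => congrArg (fun e => e.2.2) h, fun h => by rw [h]⟩
lemma pvSEne (c r c' r' : List Int) (i i' : Int) : pvStart c r i ≠ pvEnd c' r' i' := by
  intro h; have := congrArg (fun e => e.2.1) h; simp [pvStart, pvEnd] at this
lemma pvSTne (c r x : List Int) (i j : Int) : pvStart c r i ≠ pvTown x j := by
  intro h; have := congrArg (fun e => e.2.1) h; simp [pvStart, pvTown] at this
lemma pvETne (c r x : List Int) (i j : Int) : pvEnd c r i ≠ pvTown x j := by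
  intro h; have := congrArg (fun e => e.2.1) h; simp [pvEnd, pvTown] at this

-- getD after set
lemma pvGetD_set (l : List Int) (i k : Nat) (v : Int) (hi : i < l.length) :
    (l.set i v).getD k 0 = if k = i then v else l.getD k 0 := by
  rcases Nat.lt_or_ge k l.length with hk | hk
  · rw [List.getD_eq_getElem _ _ (by simpa using hk), List.getD_eq_getElem _ _ hk,
      List.getElem_set]
    by_cases h : k = i
    · simp [h]
    · rw [if_neg (fun hh => h hh.symm), if_neg h]
  · have h1 : ¬ k = i := by omega
    rw [if_neg h1]
    rw [List.getD_eq_default _ _ (by simpa using hk), List.getD_eq_default _ _ hk]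

lemma pvRep_getD (mn k : Nat) : (List.replicate mn (0 : Int)).getD k 0 = 0 := by
  rcases Nat.lt_or_ge k mn with h | h
  · rw [List.getD_eq_getElem _ _ (by simpa using h), List.getElem_replicate]
  · exact List.getD_eq_default _ _ (by simpa using h)

-- a list agreeing with the bucket sums is the bucket list
lemma pvBuckets_of (p x c r : List Int) (m n : Int) (bl : List Int)
    (hlen : bl.length = m.toNat)
    (h : ∀ k : Nat, k < m.toNat → bl.getD k 0 = pvSum p x c r m n [(k : Int)]) :
    bl = pvBuckets p x c r m n := by
  apply List.ext_getElem
  · simp [pvBuckets, hlen]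
  · intro i h1 h2
    have hi : i < m.toNat := by rwa [hlen] at h1
    have hL : bl[i] = bl.getD i 0 := (List.getD_eq_getElem bl 0 h1).symm
    have hR : (pvBuckets p x c r m n)[i] = pvSum p x c r m n [(i : Int)] := by
      simp only [pvBuckets]
      rw [List.getElem_map (f := fun k : Nat => pvSum p x c r m n [(k : Int)]),
        List.getElem_range]
    rw [hL, h i hi, hR]

-- ---- the sweep (port A) ----

-- ---- the sweep (port A) ----

lemma pvSweep (p x c r : List Int) (m n : Int)
    (hrad : ∀ i ∈ PySem.List.pyRange 0 m 1, 0 ≤ PySem.List.pyGetD r i 0)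
    (S : List (Int × String × Int))
    (hperm : S.Perm (pvEvents x c r m n))
    (hpw : S.Pairwise (fun a b => pvKey m n a < pvKey m n b)) :
    ∀ (rest done : List (Int × String × Int)) (act cp : List Int) (tot : Int),
      done ++ rest = S →
      act.Nodup →
      (∀ i : Int, i ∈ act ↔ ((0 ≤ i ∧ i < m) ∧ pvStart c r i ∈ done ∧ pvEnd c r i ∉ done)) →
      cp.length = m.toNat →
      (∀ k : Nat, k < m.toNat → cp.getD k 0 = pvSumD p x c r m n done [(k : Int)]) →
      tot = pvSumD p x c r m n done [] →
      ((rest.foldl (pvStepA p) (act, cp, tot)).2.1.length = m.toNat ∧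
       (∀ k : Nat, k < m.toNat →
         (rest.foldl (pvStepA p) (act, cp, tot)).2.1.getD k 0
           = pvSumD p x c r m n S [(k : Int)]) ∧
       (rest.foldl (pvStepA p) (act, cp, tot)).2.2
           = pvSumD p x c r m n S []) := by
  intro rest
  induction rest with
  | nil =>
      intro done act cp tot hS hnd hact hlen hcp htot
      rw [List.append_nil] at hS
      subst hS
      exact ⟨hlen, fun k hk => hcp k hk, htot⟩
  | cons e rest' ih =>
      intro done act cp tot hS hnd hact hlen hcp htot
      have heS : e ∈ S := by rw [← hS]; simp
      have heE : e ∈ pvEvents x c r m n := hperm.subset heS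
      have hpre : ∀ y, y ∈ pvEvents x c r m n → (y ∈ done ↔ pvKey m n y < pvKey m n e) :=
        fun y hy => pvPrefix_mem x c r m n S done rest' e hS hperm hpw y hy
      have heNd : e ∉ done := fun h => lt_irrefl _ ((hpre e heE).1 h)
      have hS' : (done ++ [e]) ++ rest' = S := by rw [← hS]; simp
      simp only [List.foldl_cons]
      rcases (pvMem_events x c r m n e).1 heE with ⟨i0, hi0, rfl | rfl⟩ | ⟨j0, hj0, rfl⟩
      · -- e = pvStart c r i0
        have hr0 : 0 ≤ PySem.List.pyGetD r i0 0 :=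
          hrad i0 (by rw [PySem.List.mem_pyRange_one]; omega)
        have hEnot : pvEnd c r i0 ∉ done := by
          rw [hpre _ (pvEndE x c r m n i0 hi0.1 hi0.2)]
          intro h
          exact absurd (lt_trans h (pvKey_SE x c r m n i0 hi0.1 hi0.2 hr0)) (lt_irrefl _)
        have hstep : pvStepA p (act, cp, tot) (pvStart c r i0)
            = (PySem.Set.add act i0, cp, tot) := by
          simp [pvStepA, pvStart]
        rw [hstep]
        refine ih (done ++ [pvStart c r i0]) _ _ _ hS'
          (PySem.Set.nodup_add act i0 hnd) ?_ hlen
          (fun k hk => by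
            rw [pvSumD_append_not_town p x c r m n done _ (by simp [pvStart])]
            exact hcp k hk)
          (by rw [pvSumD_append_not_town p x c r m n done _ (by simp [pvStart])]; exact htot)
        intro i
        rw [PySem.Set.mem_add]
        simp only [List.mem_append, List.mem_singleton]
        constructor
        · rintro (hiact | hii)
          · obtain ⟨hb, hsd, hed⟩ := (hact i).1 hiact
            exact ⟨hb, Or.inl hsd, fun h => by
              rcases h with h | h
              · exact hed h
              · exact pvSEne c r c r i0 i h.symm⟩
          · subst hii
            refine ⟨hi0, Or.inr rfl, fun h => ?_⟩
            rcases h with h | h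
            · exact hEnot h
            · exact pvSEne c r c r i i h.symm
        · rintro ⟨hb, hsd, hed⟩
          rcases hsd with hsd | hsd
          · exact Or.inl ((hact i).2 ⟨hb, hsd, fun h => hed (Or.inl h)⟩)
          · exact Or.inr ((pvSS c r i i0).1 hsd)
      · -- e = pvEnd c r i0
        have hr0 : 0 ≤ PySem.List.pyGetD r i0 0 :=
          hrad i0 (by rw [PySem.List.mem_pyRange_one]; omega)
        have hSin : pvStart c r i0 ∈ done :=
          (hpre _ (pvStartE x c r m n i0 hi0.1 hi0.2)).2 (pvKey_SE x c r m n i0 hi0.1 hi0.2 hr0)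
        have hi0act : i0 ∈ act := (hact i0).2 ⟨hi0, hSin, heNd⟩
        have hrm : PySem.Set.remove? act i0 = some (PySem.Set.discard act i0) :=
          PySem.Set.remove?_of_mem hi0act
        have hstep : pvStepA p (act, cp, tot) (pvEnd c r i0)
            = (PySem.Set.discard act i0, cp, tot) := by
          simp [pvStepA, pvEnd, hrm]
        rw [hstep]
        refine ih (done ++ [pvEnd c r i0]) _ _ _ hS'
          (PySem.Set.nodup_discard act i0 hnd) ?_ hlen
          (fun k hk => by
            rw [pvSumD_append_not_town p x c r m n done _ (by simp [pvEnd])]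
            exact hcp k hk)
          (by rw [pvSumD_append_not_town p x c r m n done _ (by simp [pvEnd])]; exact htot)
        intro i
        rw [PySem.Set.mem_discard]
        constructor
        · rintro ⟨hiact, hne⟩
          obtain ⟨hb, hsd, hed⟩ := (hact i).1 hiact
          simp only [List.mem_append, List.mem_singleton]
          exact ⟨hb, Or.inl hsd, fun h => by
            rcases h with h | h
            · exact hed h
            · exact hne ((pvEE' c r i i0).1 h)⟩
        · simp only [List.mem_append, List.mem_singleton]
          rintro ⟨hb, hsd, hed⟩
          have hsd' : pvStart c r i ∈ done := by
            rcases hsd with h | h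
            · exact h
            · exact absurd h (pvSEne c r c r i i0)
          have hne : i ≠ i0 := fun h => hed (by rw [h]; exact Or.inr rfl)
          exact ⟨(hact i).2 ⟨hb, hsd', fun h => hed (Or.inl h)⟩, hne⟩
      · -- e = pvTown x j0
        have hcovmem : ∀ i : Int, i ∈ act ↔ i ∈ pvCov x c r m j0 := by
          intro i
          rw [hact i, pvCov, List.mem_filter, PySem.List.mem_pyRange_one]
          constructor
          · rintro ⟨hb, hsd, hed⟩
            have h1 := (hpre _ (pvStartE x c r m n i hb.1 hb.2)).1 hsd
            have h2 : ¬ pvKey m n (pvEnd c r i) < pvKey m n (pvTown x j0) :=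
              fun hh => hed ((hpre _ (pvEndE x c r m n i hb.1 hb.2)).2 hh)
            rw [pvKey_ST x c r m n i j0 hb.1 hb.2 hj0.1 hj0.2] at h1
            rw [pvKey_ET x c r m n i j0 hb.1 hb.2 hj0.1 hj0.2] at h2
            exact ⟨by omega, by simp [pvQ]; omega⟩
          · rintro ⟨hb, hq⟩
            simp [pvQ] at hq
            refine ⟨⟨hb.1, hb.2⟩,
              (hpre _ (pvStartE x c r m n i hb.1 hb.2)).2
                (by rw [pvKey_ST x c r m n i j0 hb.1 hb.2 hj0.1 hj0.2]; omega),
              fun hed => ?_⟩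
            have := (hpre _ (pvEndE x c r m n i hb.1 hb.2)).1 hed
            rw [pvKey_ET x c r m n i j0 hb.1 hb.2 hj0.1 hj0.2] at this
            omega
        have hcovnd : (pvCov x c r m j0).Nodup :=
          (PySem.List.nodup_pyRange_one 0 m).filter _
        have hpermc : act.Perm (pvCov x c r m j0) :=
          (List.perm_ext_iff_of_nodup hnd hcovnd).2 hcovmem
        have hlenc : act.length = (pvCov x c r m j0).length := hpermc.length_eq
        rcases hcv : pvCov x c r m j0 with _ | ⟨iA, _ | ⟨iB, tC⟩⟩
        · -- no covering cloud: the town is always sunny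
          have hact0 : act = [] := by
            rw [hcv] at hlenc
            exact List.length_eq_zero_iff.1 hlenc
          have hstep : pvStepA p (act, cp, tot) (pvTown x j0)
              = (act, cp, tot + PySem.List.pyGetD p j0 0) := by
            rw [hact0]
            simp [pvStepA, pvTown, PySem.Set.len]
          rw [hstep]
          refine ih (done ++ [pvTown x j0]) _ _ _ hS' hnd ?_ hlen
            (fun k hk => by
              rw [pvSumD_append_town p x c r m n done j0 hj0 heNd]
              rw [hcv, if_neg (by simp)]
              rw [hcp k hk]; ring)
            (by rw [pvSumD_append_town p x c r m n done j0 hj0 heNd, hcv, if_pos rfl, htot])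
          intro i
          rw [hact i]
          simp only [List.mem_append, List.mem_singleton]
          constructor
          · rintro ⟨hb, hsd, hed⟩
            exact ⟨hb, Or.inl hsd, fun h => by
              rcases h with h | h
              · exact hed h
              · exact pvETne c r x i j0 h⟩
          · rintro ⟨hb, hsd, hed⟩
            have hsd' : pvStart c r i ∈ done := by
              rcases hsd with h | h
              · exact h
              · exact absurd h (pvSTne c r x i j0)
            exact ⟨hb, hsd', fun h => hed (Or.inl h)⟩
        · -- exactly one covering cloud iA
          have hiA : 0 ≤ iA ∧ iA < m := by
            have hin : iA ∈ pvCov x c r m j0 := by rw [hcv]; simp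
            rw [pvCov, List.mem_filter, PySem.List.mem_pyRange_one] at hin
            exact hin.1
          have hact1 : act = [iA] := by
            rw [hcv] at hlenc
            obtain ⟨aa, haa⟩ := List.length_eq_one_iff.1 hlenc
            have hmm : aa ∈ pvCov x c r m j0 := (hcovmem aa).1 (by rw [haa]; simp)
            rw [hcv, List.mem_singleton] at hmm
            rw [haa, hmm]
          have hiAlen : iA.toNat < cp.length := by rw [hlen]; omega
          have hset : PySem.List.pySetD cp iA (PySem.List.pyGetD cp iA 0 + PySem.List.pyGetD p j0 0)
              = cp.set iA.toNat (cp.getD iA.toNat 0 + PySem.List.pyGetD p j0 0) := by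
            rw [PySem.List.pySetD_of_nonneg cp _ hiA.1,
              PySem.List.pyGetD_eq_getElem cp (i := iA) 0 hiA.1 (by omega),
              List.getD_eq_getElem cp 0 hiAlen]
          have hstep : pvStepA p (act, cp, tot) (pvTown x j0)
              = (act, cp.set iA.toNat (cp.getD iA.toNat 0 + PySem.List.pyGetD p j0 0), tot) := by
            rw [← hset, hact1]
            simp [pvStepA, pvTown, PySem.Set.len, PySem.List.pyGetD_zero_cons]
          rw [hstep]
          refine ih (done ++ [pvTown x j0]) _ _ _ hS' hnd ?_
            (by rw [List.length_set]; exact hlen)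
            (fun k hk => by
              rw [pvSumD_append_town p x c r m n done j0 hj0 heNd, hcv]
              rw [pvGetD_set cp iA.toNat k _ hiAlen]
              by_cases hk0 : k = iA.toNat
              · rw [if_pos hk0, if_pos (by rw [hk0]; congr 1; omega), hk0,
                  hcp iA.toNat (by omega)]
              · have hne : ¬ ([iA] : List Int) = [(k : Int)] := by
                  intro hh
                  apply hk0
                  have h2 : iA = (k : Int) := by injection hh
                  omega
                rw [if_neg hk0, if_neg hne, hcp k hk]
                ring)
            (by rw [pvSumD_append_town p x c r m n done j0 hj0 heNd, hcv,
                  if_neg (by simp), htot]; ring)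
          intro i
          rw [hact i]
          simp only [List.mem_append, List.mem_singleton]
          constructor
          · rintro ⟨hb, hsd, hed⟩
            exact ⟨hb, Or.inl hsd, fun h => by
              rcases h with h | h
              · exact hed h
              · exact pvETne c r x i j0 h⟩
          · rintro ⟨hb, hsd, hed⟩
            have hsd' : pvStart c r i ∈ done := by
              rcases hsd with h | h
              · exact h
              · exact absurd h (pvSTne c r x i j0)
            exact ⟨hb, hsd', fun h => hed (Or.inl h)⟩
        · -- two or more covering clouds
          have hActne : act ≠ [] := by
            intro h
            rw [h, hcv] at hlenc
            simp at hlenc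
          have hActlen1 : ¬ act.length = 1 := by
            rw [hlenc, hcv]
            simp only [List.length_cons]
            omega
          have hstep : pvStepA p (act, cp, tot) (pvTown x j0) = (act, cp, tot) := by
            simp [pvStepA, pvTown, hActne, hActlen1]
          rw [hstep]
          refine ih (done ++ [pvTown x j0]) _ _ _ hS' hnd ?_ hlen
            (fun k hk => by
              rw [pvSumD_append_town p x c r m n done j0 hj0 heNd, hcv,
                if_neg (by simp), hcp k hk]; ring)
            (by rw [pvSumD_append_town p x c r m n done j0 hj0 heNd, hcv,
                if_neg (by simp), htot]; ring)
          intro i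
          rw [hact i]
          simp only [List.mem_append, List.mem_singleton]
          constructor
          · rintro ⟨hb, hsd, hed⟩
            exact ⟨hb, Or.inl hsd, fun h => by
              rcases h with h | h
              · exact hed h
              · exact pvETne c r x i j0 h⟩
          · rintro ⟨hb, hsd, hed⟩
            have hsd' : pvStart c r i ∈ done := by
              rcases hsd with h | h
              · exact h
              · exact absurd h (pvSTne c r x i j0)
            exact ⟨hb, hsd', fun h => hed (Or.inl h)⟩

-- ---- port B's loops ----

lemma pvCount_last (q : Int → Bool) :
    ∀ (l : List Int) (c0 l0 : Int),
      l.foldl (fun (s : Int × Int) i => if q i then (s.1 + 1, i) else s) (c0, l0)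
        = (c0 + (l.countP q : Int), (l.filter q).getLastD l0) := by
  intro l
  induction l with
  | nil => intro c0 l0; simp
  | cons a t ih =>
      intro c0 l0
      cases hq : q a
      · simp only [List.foldl_cons, List.countP_cons, List.filter_cons, hq,
          Bool.false_eq_true, if_false]
        rw [ih c0 l0]
        simp
      · simp only [List.foldl_cons, List.countP_cons, List.filter_cons, hq, if_true]
        rw [ih (c0 + 1) a]
        simp only [Prod.mk.injEq]
        refine ⟨by push_cast; ring, ?_⟩
        rw [List.getLastD_cons]

lemma pvInner_eq (x c r : List Int) (m : Int) (j : Int) :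
    (PySem.List.pyRange 0 m 1).foldl (pvInnerB x c r j) ((0 : Int), (-1 : Int))
      = (((pvCov x c r m j).length : Int), (pvCov x c r m j).getLastD (-1)) := by
  have hfun : pvInnerB x c r j = fun (s : Int × Int) i => if pvQ x c r j i then (s.1 + 1, i) else s := by
    funext s i; rfl
  rw [hfun, pvCount_last]
  rw [List.countP_eq_length_filter]
  simp [pvCov]

lemma pvOuterB (p x c r : List Int) (m : Int) :
    ∀ (l : List Int) (b0 : Int) (bk : List Int), bk.length = m.toNat →
      ((l.foldl (pvStepB p x m c r) (b0, bk)).1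
          = b0 + (l.map (pvPick p x c r m [])).sum ∧
       (l.foldl (pvStepB p x m c r) (b0, bk)).2.length = m.toNat ∧
       (∀ k : Nat, k < m.toNat →
         (l.foldl (pvStepB p x m c r) (b0, bk)).2.getD k 0
           = bk.getD k 0 + (l.map (pvPick p x c r m [(k : Int)])).sum)) := by
  intro l
  induction l with
  | nil =>
      intro b0 bk hlen
      exact ⟨by simp, hlen, fun k hk => by simp⟩
  | cons j t ih =>
      intro b0 bk hlen
      simp only [List.foldl_cons, List.map_cons, List.sum_cons]
      rcases hcv : pvCov x c r m j with _ | ⟨iA, _ | ⟨iB, tC⟩⟩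
      · have hstep : pvStepB p x m c r (b0, bk) j = (b0 + PySem.List.pyGetD p j 0, bk) := by
          unfold pvStepB
          rw [pvInner_eq, hcv]
          simp
        rw [hstep]
        obtain ⟨h1, h2, h3⟩ := ih (b0 + PySem.List.pyGetD p j 0) bk hlen
        refine ⟨?_, h2, ?_⟩
        · rw [h1]
          simp [pvPick, hcv]
          ring
        · intro k hk
          rw [h3 k hk]
          simp [pvPick, hcv]
      · have hiA : 0 ≤ iA ∧ iA < m := by
          have hin : iA ∈ pvCov x c r m j := by rw [hcv]; simp
          rw [pvCov, List.mem_filter, PySem.List.mem_pyRange_one] at hin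
          exact hin.1
        have hiAlen : iA.toNat < bk.length := by rw [hlen]; omega
        have hset : PySem.List.pySetD bk iA (PySem.List.pyGetD bk iA 0 + PySem.List.pyGetD p j 0)
            = bk.set iA.toNat (bk.getD iA.toNat 0 + PySem.List.pyGetD p j 0) := by
          rw [PySem.List.pySetD_of_nonneg bk _ hiA.1,
            PySem.List.pyGetD_eq_getElem bk (i := iA) 0 hiA.1 (by omega),
            List.getD_eq_getElem bk 0 hiAlen]
        have hstep : pvStepB p x m c r (b0, bk) j
            = (b0, bk.set iA.toNat (bk.getD iA.toNat 0 + PySem.List.pyGetD p j 0)) := by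
          rw [← hset]
          unfold pvStepB
          rw [pvInner_eq, hcv]
          norm_num
        rw [hstep]
        obtain ⟨h1, h2, h3⟩ := ih b0
          (bk.set iA.toNat (bk.getD iA.toNat 0 + PySem.List.pyGetD p j 0))
          (by rw [List.length_set]; exact hlen)
        refine ⟨?_, h2, ?_⟩
        · rw [h1]
          simp [pvPick, hcv]
        · intro k hk
          rw [h3 k hk, pvGetD_set bk iA.toNat k _ hiAlen]
          by_cases hk0 : k = iA.toNat
          · rw [if_pos hk0, hk0]
            simp only [pvPick, hcv]
            rw [if_pos (show ([iA] : List Int) = [((iA.toNat : Nat) : Int)] by congr 1; omega)]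
            ring
          · have hne : ¬ ([iA] : List Int) = [(k : Int)] := by
              intro hh
              apply hk0
              have h2' : iA = (k : Int) := by injection hh
              omega
            rw [if_neg hk0]
            simp only [pvPick, hcv, if_neg hne]
            ring
      · have hstep : pvStepB p x m c r (b0, bk) j = (b0, bk) := by
          unfold pvStepB
          rw [pvInner_eq, hcv]
          simp only [List.length_cons]
          push_cast
          rw [if_neg (by omega), if_neg (by omega)]
        rw [hstep]
        obtain ⟨h1, h2, h3⟩ := ih b0 bk hlen
        refine ⟨?_, h2, ?_⟩
        · rw [h1]
          simp [pvPick, hcv]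
        · intro k hk
          rw [h3 k hk]
          simp [pvPick, hcv]

-- ---- assembling the two sides ----

lemma pvA_eq (p x c r : List Int) (m : Int)
    (hrad : ∀ i ∈ PySem.List.pyRange 0 m 1, 0 ≤ PySem.List.pyGetD r i 0) :
    maximumPeople p x m c r
      = pvSum p x c r m (p.length : Int) []
          + PySem.List.maxD (pvBuckets p x c r m (p.length : Int)) (fun v => v) 0 := by
  have hn : PySem.List.len p = (p.length : Int) := PySem.List.len_eq p
  simp only [maximumPeople, hn]
  have hev1 : (PySem.List.pyRange 0 m 1).foldl (fun ev i =>
        ev ++ [(PySem.List.pyGetD c i 0 - PySem.List.pyGetD r i 0, "start", i)]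
           ++ [(PySem.List.pyGetD c i 0 + PySem.List.pyGetD r i 0 + 1, "end", i)]) []
      = (PySem.List.pyRange 0 m 1).flatMap (fun i => [pvStart c r i, pvEnd c r i]) := by
    have hfun : (fun (ev : List (Int × String × Int)) (i : Int) =>
          ev ++ [(PySem.List.pyGetD c i 0 - PySem.List.pyGetD r i 0, "start", i)]
             ++ [(PySem.List.pyGetD c i 0 + PySem.List.pyGetD r i 0 + 1, "end", i)])
        = (fun ev i => ev ++ [pvStart c r i, pvEnd c r i]) := by
      funext ev i
      simp [pvStart, pvEnd]
    rw [hfun, PySem.List.foldl_append_eq_flatMap (fun i => [pvStart c r i, pvEnd c r i])]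
    simp
  rw [hev1]
  have hev2 : (PySem.List.pyRange 0 (p.length : Int) 1).foldl (fun ev i =>
        ev ++ [(PySem.List.pyGetD x i 0, "town", i)])
        ((PySem.List.pyRange 0 m 1).flatMap (fun i => [pvStart c r i, pvEnd c r i]))
      = pvEvents x c r m (p.length : Int) := by
    have hfun : (fun (ev : List (Int × String × Int)) (i : Int) =>
          ev ++ [(PySem.List.pyGetD x i 0, "town", i)])
        = (fun ev i => ev ++ [pvTown x i]) := by
      funext ev i
      simp [pvTown]
    rw [hfun, PySem.List.foldl_append_singleton_eq_map (pvTown x)]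
    rfl
  rw [hev2, pvSort_eq x c r m (p.length : Int)]
  obtain ⟨h1, h2, h3⟩ := pvSweep p x c r m (p.length : Int) hrad
    (PySem.List.sorted (pvEvents x c r m (p.length : Int)) (pvKey m (p.length : Int)) false)
    (PySem.List.sorted_perm _ _ _)
    (pvSorted_strict x c r m (p.length : Int))
    (PySem.List.sorted (pvEvents x c r m (p.length : Int)) (pvKey m (p.length : Int)) false)
    [] PySem.Set.empty (List.replicate m.toNat 0) 0
    (by simp)
    List.nodup_nil
    (by intro i; simp [PySem.Set.empty])
    (by simp)
    (fun k hk => by rw [pvSumD_nil, pvRep_getD])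
    (pvSumD_nil p x c r m (p.length : Int) []).symm
  rw [h3, pvSumD_full p x c r m (p.length : Int) _ (PySem.List.sorted_perm _ _ _)]
  have hb : (((PySem.List.sorted (pvEvents x c r m (p.length : Int)) (pvKey m (p.length : Int)) false)).foldl
        (pvStepA p) (PySem.Set.empty, List.replicate m.toNat 0, 0)).2.1
      = pvBuckets p x c r m (p.length : Int) := by
    apply pvBuckets_of p x c r m (p.length : Int) _ h1
    intro k hk
    rw [h2 k hk, pvSumD_full p x c r m (p.length : Int) _ (PySem.List.sorted_perm _ _ _)]
  rw [hb]

lemma pvB_eq (p x c r : List Int) (m : Int) :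
    maximumPeople_alt p x m c r
      = pvSum p x c r m (p.length : Int) []
          + PySem.List.maxD (pvBuckets p x c r m (p.length : Int)) (fun v => v) 0 := by
  have hn : PySem.List.len p = (p.length : Int) := PySem.List.len_eq p
  simp only [maximumPeople_alt, hn]
  obtain ⟨h1, h2, h3⟩ := pvOuterB p x c r m (PySem.List.pyRange 0 (p.length : Int) 1)
    0 (List.replicate m.toNat 0) (by simp)
  rw [h1]
  have hb : ((PySem.List.pyRange 0 (p.length : Int) 1).foldl (pvStepB p x m c r)
        (0, List.replicate m.toNat 0)).2 = pvBuckets p x c r m (p.length : Int) := by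
    apply pvBuckets_of p x c r m (p.length : Int) _ h2
    intro k hk
    rw [h3 k hk, pvRep_getD]
    rw [zero_add]
    rfl
  rw [hb]
  rw [zero_add]
  rfl

-- ===== VERDICT (by name: the statement is the Claim_ definition above) =====
theorem maximumPeople_spec : Claim_equal_maximumPeople := by
  intro p x m c r _ hpre
  unfold Spec_maximumPeople
  rw [pvA_eq p x c r m hpre.2.2.2, pvB_eq p x c r m]
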